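-- pv_equiv track=rewrite | github.com/Jakub-Woszczek/Algorithms-and-Data-Structures-AGH-CS-Course- | Ćwiczenia dynamików (Egz próbne) ~ Szymuś/Zad 3/1. Podejście.py | ksuma
-- ===== SOURCE A (Python) =====
-- def ksuma( T, k ):
--
--     def find_min_value_and_last_index(lst):
--         if not lst:  # sprawdzenie czy lista nie jest pusta
--             return None, None
--
--         min_value = float('inf')
--         max_index = -1
--
--         for i, value in enumerate(lst):
--             if value < min_value:
--                 min_value = value
--                 max_index = i
--             elif value == min_value:
--                 max_index = i
--
--         return min_value, max_index
--
--     n = len(T)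
--     last_sum_index = 0
--     suma_k_ladna = 0
--
--     while last_sum_index < n-k:
--
--         val,curr_index = find_min_value_and_last_index(T[last_sum_index:last_sum_index+k])
--         suma_k_ladna += val
--         last_sum_index = last_sum_index + curr_index + 1
--
--     return suma_k_ladna
--
-- T = [1, 2, 3, 4, 6, 15, 8, 7]
-- ===== SOURCE B (Python) =====
-- def ksuma(T, k):
--     # Sparse table (range-minimum with last-index tie-break): precompute, in
--     # table[j][i], the (min value, last argmin index) of T[i:i+2**j]; each
--     # greedy window query is then two table lookups instead of a k-long scan.
--     n = len(T)
--     total = 0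
--     if n <= k:
--         return total
--     table = [[(T[i], i) for i in range(n)]]
--     size = 2
--     while size <= n:
--         prev = table[-1]
--         half = size // 2
--         table.append([prev[i] if prev[i][0] < prev[i + half][0] else prev[i + half]
--                       for i in range(n - size + 1)])
--         size *= 2
--     def query(l, r):  # last-argmin pair of T[l:r], 0 <= l < r <= n
--         j = (r - l).bit_length() - 1
--         p = 1 << j
--         a = table[j][l]
--         b = table[j][r - p]
--         return a if a[0] < b[0] else b
--     i = 0
--     while i < n - k:
--         v, idx = query(i, i + k)
--         total += v
--         i = idx + 1
--     return total
-- ===== Notes on version B (the rewrite author's own statement) =====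
-- stated objective: alternative
-- what changed: A rescans each k-window with a hand-written (min, last-index) loop; B precomputes a sparse table of (min value, last argmin) pairs over power-of-two ranges and answers each window query with two table lookups instead of a k-long scan.
import Mathlib
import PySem

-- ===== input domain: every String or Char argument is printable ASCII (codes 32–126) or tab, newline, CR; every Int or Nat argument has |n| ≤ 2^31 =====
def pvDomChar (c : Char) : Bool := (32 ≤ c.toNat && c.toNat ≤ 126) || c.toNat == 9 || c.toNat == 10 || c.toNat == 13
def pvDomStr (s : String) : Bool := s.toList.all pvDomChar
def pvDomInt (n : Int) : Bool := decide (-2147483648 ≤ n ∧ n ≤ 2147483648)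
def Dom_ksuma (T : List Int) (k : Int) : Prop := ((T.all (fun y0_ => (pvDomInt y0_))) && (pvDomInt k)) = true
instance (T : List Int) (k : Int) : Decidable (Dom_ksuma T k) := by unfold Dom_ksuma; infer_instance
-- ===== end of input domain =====

-- B replaces A's per-jump window rescan by a sparse table of
-- (min value, last argmin index) pairs over power-of-two ranges, each window
-- query becoming two table lookups (objective: alternative algorithm).

-- ===== PORT A =====
-- one step of A's `for i, value in enumerate(lst)` loop; state = (min_value, max_index),
-- `none` plays float('inf') (any int compares below it, exactly as in Python)
def pvFindStep (st : Option Int × Int) (p : Int × Int) : Option Int × Int :=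
  match st with
  | (none, _) => (some p.2, p.1)
  | (some mv, idx) =>
      if p.2 < mv then (some p.2, p.1)
      else if p.2 = mv then (some mv, p.1)
      else (some mv, idx)

-- A's find_min_value_and_last_index
def pvFindMinLast (lst : List Int) : Option Int × Option Int :=
  match lst with
  | [] => (none, none)
  | _ =>
      let st := (PySem.List.enumerate lst 0).foldl pvFindStep (none, -1)
      (st.1, some st.2)

-- A's while-loop; the fuel only makes the recursion structural (inside Pre_ every
-- iteration increases i by at least 1, so T.length + 1 units never run out)
def pvKsumaLoop (T : List Int) (k : Int) (fuel : Nat) (i suma : Int) : Int :=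
  match fuel with
  | 0 => suma
  | fuel + 1 =>
      if i < (T.length : Int) - k then
        match pvFindMinLast (PySem.List.slice T (some i) (some (i + k))) with
        | (some v, some j) => pvKsumaLoop T k fuel (i + j + 1) (suma + v)
        | _ => suma   -- Python raises TypeError (None + int) here; excluded by Pre_
      else suma

def ksuma (T : List Int) (k : Int) : Int :=
  pvKsumaLoop T k (T.length + 1) 0 0

-- ===== PORT B =====
-- Source B's `a if a[0] < b[0] else b`
def pvBetter (a b : Int × Int) : Int × Int := if a.1 < b.1 then a else b

-- Source B's level 0: [(T[i], i) for i in range(n)]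
def pvLevel0 (T : List Int) : List (Int × Int) :=
  (PySem.List.enumerate T 0).map (fun p => (p.2, p.1))

-- one appended row: [better(prev[i], prev[i+size//2]) for i in range(n-size+1)]
-- (getD: the indices are in range whenever the build loop reaches this row)
def pvNextRow (prev : List (Int × Int)) (n size : Nat) : List (Int × Int) :=
  (List.range (n + 1 - size)).map
    (fun i => pvBetter (prev.getD i (0, 0)) (prev.getD (i + size / 2) (0, 0)))

-- Source B's `while size <= n` table-building loop (fuel device as in port A:
-- size doubles each step, so n units never run out)
def pvBuild (n fuel size : Nat) (table : List (List (Int × Int))) : List (List (Int × Int)) :=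
  match fuel with
  | 0 => table
  | fuel + 1 =>
      if size ≤ n then
        pvBuild n fuel (size * 2) (table ++ [pvNextRow (table.getLastD []) n size])
      else table

-- Source B's query(l, r)  (getD: in range for the loop's queries, proved below)
def pvQuery (table : List (List (Int × Int))) (l r : Int) : Int × Int :=
  let j := PySem.Int.bitLength (r - l) - 1
  let p : Nat := 1 <<< j
  let row := table.getD j []
  pvBetter (row.getD l.toNat (0, 0)) (row.getD (r - (p : Int)).toNat (0, 0))

-- Source B's main `while i < n - k` loop
def pvAltLoop (k n : Int) (table : List (List (Int × Int))) (fuel : Nat) (i total : Int) : Int :=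
  match fuel with
  | 0 => total
  | fuel + 1 =>
      if i < n - k then
        let q := pvQuery table i (i + k)
        pvAltLoop k n table fuel (q.2 + 1) (total + q.1)
      else total

def ksuma_alt (T : List Int) (k : Int) : Int :=
  if (T.length : Int) ≤ k then 0
  else
    pvAltLoop k (T.length : Int) (pvBuild T.length T.length 2 [pvLevel0 T])
      (T.length + 1) 0 0

-- ===== PRECONDITION & SPEC =====
-- Pre_ excludes only inputs where A raises: when k ≤ 0 (except T = [] with k ≥ 0) some
-- window slice is empty, find_min returns (None, None) and `suma += None` raises TypeError.
def Pre_ksuma (T : List Int) (k : Int) : Prop := 1 ≤ k ∨ (T = [] ∧ 0 ≤ k)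
instance (T : List Int) (k : Int) : Decidable (Pre_ksuma T k) := by unfold Pre_ksuma; infer_instance

def pvWitness_ksuma : List Int × Int := ([3, 1, 2, 1, 5], 2)

def Spec_ksuma (T : List Int) (k : Int) (out : Int) : Prop := out = ksuma_alt T k
instance (T : List Int) (k : Int) (out : Int) : Decidable (Spec_ksuma T k out) := by unfold Spec_ksuma; infer_instance

-- ===== CLAIM (what is proved, stated in full; the proofs are below) =====
def Claim_equal_ksuma : Prop := ∀ (T : List Int) (k : Int), Dom_ksuma T k → Pre_ksuma T k → Spec_ksuma T k (ksuma T k)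

-- ===== LEMMAS AND PROOFS =====


-- p is the (min value, LAST argmin index) pair of T[lo:hi]
def IsLast (T : List Int) (lo hi : Nat) (p : Int × Int) : Prop :=
  ∃ j : Nat, p = (T.getD j 0, (j : Int)) ∧ lo ≤ j ∧ j < hi ∧
    (∀ t, lo ≤ t → t < hi → p.1 ≤ T.getD t 0) ∧
    (∀ t, j < t → t < hi → p.1 < T.getD t 0)

-- row `lvl` of the table: entry i is the last-argmin pair of T[i : i+2^lvl]
def GoodRow (T : List Int) (lvl : Nat) (row : List (Int × Int)) : Prop :=
  row.length = T.length + 1 - 2 ^ lvl ∧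
  ∀ i, i + 2 ^ lvl ≤ T.length → IsLast T i (i + 2 ^ lvl) (row.getD i (0, 0))

def GoodTable (T : List Int) (table : List (List (Int × Int))) : Prop :=
  ∀ lvl, 2 ^ lvl ≤ T.length → GoodRow T lvl (table.getD lvl [])

lemma isLast_unique (T : List Int) (lo hi : Nat) (p q : Int × Int)
    (hp : IsLast T lo hi p) (hq : IsLast T lo hi q) : p = q := by
  obtain ⟨j, hpj, hlo, hhi, hle, hlt⟩ := hp
  obtain ⟨j', hqj, hlo', hhi', hle', hlt'⟩ := hq
  subst hpj; subst hqj
  simp only at hle hlt hle' hlt'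
  have hj : j = j' := by
    by_contra hne
    rcases Nat.lt_or_ge j j' with h | h
    · have h2 := hlt j' h hhi'
      have h3 := hle' j hlo hhi
      omega
    · have h2 := hlt' j (by omega) hhi
      have h3 := hle j' hlo' hhi'
      omega
  subst hj; rfl

lemma pvBetter_isLast (T : List Int) (l1 r1 l2 r2 : Nat) (a b : Int × Int)
    (ha : IsLast T l1 r1 a) (hb : IsLast T l2 r2 b)
    (h12 : l1 ≤ l2) (hcov : l2 ≤ r1) (hrr : r1 ≤ r2) :
    IsLast T l1 r2 (pvBetter a b) := by
  obtain ⟨ja, haj, halo, hahi, hale, halt⟩ := ha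
  obtain ⟨jb, hbj, hblo, hbhi, hble, hblt⟩ := hb
  unfold pvBetter
  split_ifs with h
  · refine ⟨ja, haj, halo, by omega, ?_, ?_⟩
    · intro t ht1 ht2
      rcases Nat.lt_or_ge t r1 with h' | h'
      · exact hale t ht1 h'
      · exact le_of_lt (lt_of_lt_of_le h (hble t (by omega) ht2))
    · intro t ht1 ht2
      rcases Nat.lt_or_ge t r1 with h' | h'
      · exact halt t ht1 h'
      · exact lt_of_lt_of_le h (hble t (by omega) ht2)
  · push Not at h
    refine ⟨jb, hbj, by omega, hbhi, ?_, ?_⟩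
    · intro t ht1 ht2
      rcases Nat.lt_or_ge t r1 with h' | h'
      · exact le_trans h (hale t ht1 h')
      · exact hble t (by omega) ht2
    · intro t ht1 ht2
      exact hblt t ht1 ht2

lemma pvLevel0_good (T : List Int) : GoodRow T 0 (pvLevel0 T) := by
  constructor
  · simp [pvLevel0, PySem.List.length_enumerate]
  · intro i hi
    simp only [pow_zero] at hi ⊢
    have hgt : (pvLevel0 T).getD i (0, 0) = (T.getD i 0, (i : Int)) := by
      have h1 : i < T.length := by omega
      simp [pvLevel0, List.getD_eq_getElem?_getD, PySem.List.getElem?_enumerate,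
        List.getElem?_eq_getElem h1, List.getD_eq_getElem?_getD]
    rw [hgt]
    refine ⟨i, rfl, le_refl i, by omega, ?_, ?_⟩
    · intro t ht1 ht2
      have ht : t = i := by omega
      subst ht; simp
    · intro t ht1 ht2; omega

lemma pvNextRow_good' (T : List Int) (prev : List (Int × Int)) (P : Nat) (hP : 0 < P)
        (hent : ∀ i, i + P ≤ T.length → IsLast T i (i + P) (prev.getD i (0, 0))) :
    (pvNextRow prev T.length (2 * P)).length = T.length + 1 - 2 * P ∧
    ∀ i, i + 2 * P ≤ T.length →
      IsLast T i (i + 2 * P) ((pvNextRow prev T.length (2 * P)).getD i (0, 0)) := by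
  have e2 : 2 * P / 2 = P := by omega
  constructor
  · simp [pvNextRow]
  · intro i hi
    have hir : i < T.length + 1 - 2 * P := by omega
    have hgt : (pvNextRow prev T.length (2 * P)).getD i (0, 0) =
        pvBetter (prev.getD i (0, 0)) (prev.getD (i + P) (0, 0)) := by
      simp only [pvNextRow, List.getD_eq_getElem?_getD, List.getElem?_map,
        List.getElem?_range hir, e2]
      rfl
    rw [hgt]
    have h1 := hent i (by omega)
    have h2 := hent (i + P) (by omega)
    have hc := pvBetter_isLast T i (i + P) (i + P) (i + P + P)
      _ _ h1 h2 (by omega) (by omega) (by omega)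
    have he : i + 2 * P = i + P + P := by omega
    rwa [he]

lemma pvNextRow_good (T : List Int) (lvl : Nat) (prev : List (Int × Int))
    (h : GoodRow T lvl prev) :
    GoodRow T (lvl + 1) (pvNextRow prev T.length (2 ^ (lvl + 1))) := by
  have e1 : 2 ^ (lvl + 1) = 2 * 2 ^ lvl := by rw [pow_succ]; omega
  rw [GoodRow, e1]
  exact pvNextRow_good' T prev (2 ^ lvl) (Nat.two_pow_pos lvl) h.2

lemma pv_lvl_lt (lvl m n : Nat) (h1 : 2 ^ lvl ≤ n) (h2 : n < 2 ^ m) : lvl < m := by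
  by_contra h
  push Not at h
  have := Nat.pow_le_pow_right (n := 2) (by omega) h
  omega

lemma pvBuild_good (T : List Int) :
    ∀ (fuel m : Nat) (table : List (List (Int × Int))), 1 ≤ m →
      table.length = m →
      (∀ lvl, lvl < m → GoodRow T lvl (table.getD lvl [])) →
      T.length + 1 ≤ fuel + 2 ^ (m - 1) →
      GoodTable T (pvBuild T.length fuel (2 ^ m) table) := by
  intro fuel
  induction fuel with
  | zero =>
    intro m table hm hlen hrows hfuel
    rw [pvBuild]
    intro lvl hlvl
    refine hrows lvl (pv_lvl_lt lvl m T.length hlvl ?_)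
    have h1 : 2 ^ (m - 1) ≤ 2 ^ m := Nat.pow_le_pow_right (by omega) (by omega)
    omega
  | succ f ih =>
    intro m table hm hlen hrows hfuel
    rw [pvBuild]
    by_cases hsz : 2 ^ m ≤ T.length
    · rw [if_pos hsz]
      have hlast : table.getLastD [] = table.getD (m - 1) [] := by
        rw [List.getLastD_eq_getLast?, List.getLast?_eq_getElem?,
          List.getD_eq_getElem?_getD, hlen]
      have hprev : GoodRow T (m - 1) (table.getD (m - 1) []) := hrows (m - 1) (by omega)
      have hnew : GoodRow T m (pvNextRow (table.getLastD []) T.length (2 ^ m)) := by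
        rw [hlast]
        have h := pvNextRow_good T (m - 1) _ hprev
        rwa [show m - 1 + 1 = m by omega] at h
      have h2 : 2 ^ m * 2 = 2 ^ (m + 1) := by rw [pow_succ]
      rw [h2]
      refine ih (m + 1) _ (by omega) (by simp [hlen]) ?_ ?_
      · intro lvl hlvl
        rcases Nat.lt_or_ge lvl m with h | h
        · rw [List.getD_eq_getElem?_getD, List.getElem?_append_left (by omega),
            ← List.getD_eq_getElem?_getD]
          exact hrows lvl h
        · have hlm : lvl = m := by omega
          subst hlm
          rw [List.getD_eq_getElem?_getD, List.getElem?_append_right (by omega), hlen]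
          simpa using hnew
      · have h3 : 2 ^ m = 2 * 2 ^ (m - 1) := by
          conv_lhs => rw [show m = (m - 1) + 1 by omega]
          rw [pow_succ]; ring
        have h4 : 1 ≤ 2 ^ (m - 1) := Nat.one_le_two_pow
        simp only [Nat.add_sub_cancel]
        omega
    · rw [if_neg hsz]
      intro lvl hlvl
      exact hrows lvl (pv_lvl_lt lvl m T.length hlvl (by omega))

lemma pvQuery_isLast (T : List Int) (table : List (List (Int × Int)))
    (htab : GoodTable T table) (l r : Int)
    (hl : 0 ≤ l) (hlr : l < r) (hr : r ≤ (T.length : Int)) :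
    IsLast T l.toNat r.toNat (pvQuery table l r) := by
  have hd0 : r - l ≠ 0 := by omega
  have hna : (r - l).natAbs = r.toNat - l.toNat := by omega
  set bl := PySem.Int.bitLength (r - l) with hbl
  have hup := PySem.Int.lt_two_pow_bitLength (r - l)
  have hlo := PySem.Int.two_pow_bitLength_le (r - l) hd0
  rw [← hbl] at hup hlo
  have hbl1 : 1 ≤ bl := by
    by_contra h
    have : bl = 0 := by omega
    rw [this] at hup
    simp at hup
    omega
  set j := bl - 1 with hj
  have hjlo : 2 ^ j ≤ r.toNat - l.toNat := by rw [← hna]; exact hlo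
  have hjup : r.toNat - l.toNat < 2 ^ (j + 1) := by
    rw [← hna]
    have : j + 1 = bl := by omega
    rw [this]
    exact hup
  have hpe : (1 <<< j : Nat) = 2 ^ j := Nat.one_shiftLeft j
  have hrow := htab j (by omega)
  obtain ⟨hrl, hre⟩ := hrow
  have ha := hre l.toNat (by omega)
  have hbidx : (r - ((1 <<< j : Nat) : Int)).toNat = r.toNat - 2 ^ j := by
    rw [hpe]; omega
  have hb := hre (r.toNat - 2 ^ j) (by omega)
  have hcomb := pvBetter_isLast T l.toNat (l.toNat + 2 ^ j) (r.toNat - 2 ^ j)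
    (r.toNat - 2 ^ j + 2 ^ j) _ _ ha hb (by omega) (by omega) (by omega)
  have hend : r.toNat - 2 ^ j + 2 ^ j = r.toNat := by omega
  rw [hend] at hcomb
  show IsLast T l.toNat r.toNat
    (pvBetter ((table.getD j []).getD l.toNat (0, 0))
      ((table.getD j []).getD (r - ((1 <<< j : Nat) : Int)).toNat (0, 0)))
  rwa [hbidx]

lemma pvFindMinLast_cons (c : Int) (cs : List Int) :
    pvFindMinLast (c :: cs) =
      (((PySem.List.enumerate (c :: cs) 0).foldl pvFindStep (none, -1)).1,
        some ((PySem.List.enumerate (c :: cs) 0).foldl pvFindStep (none, -1)).2) := rfl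

lemma pv_scan_isLast (w : List Int) (hw : w ≠ []) :
    ∃ (m : Int) (j : Nat),
      (PySem.List.enumerate w 0).foldl pvFindStep (none, -1) = (some m, (j : Int)) ∧
      j < w.length ∧ w.getD j 0 = m ∧
      (∀ t, t < w.length → m ≤ w.getD t 0) ∧
      (∀ t, j < t → t < w.length → m < w.getD t 0) := by
  induction w using List.reverseRecOn with
  | nil => exact absurd rfl hw
  | append_singleton ys a ih =>
    have hget : ∀ t, t < ys.length → (ys ++ [a]).getD t 0 = ys.getD t 0 := by
      intro t ht
      rw [List.getD_eq_getElem?_getD, List.getElem?_append_left ht,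
        ← List.getD_eq_getElem?_getD]
    have hgetL : (ys ++ [a]).getD ys.length 0 = a := by
      rw [List.getD_eq_getElem?_getD, List.getElem?_append_right (le_refl _)]
      simp
    rcases eq_or_ne ys [] with rfl | hys
    · refine ⟨a, 0, ?_, by simp, by simp, ?_, ?_⟩
      · simp [PySem.List.enumerate_cons, PySem.List.enumerate_nil, pvFindStep]
      · intro t ht; simp at ht; subst ht; simp
      · intro t ht1 ht2; simp at ht2; omega
    · obtain ⟨m, j, hfold, hjlt, hgj, hle, hlt⟩ := ih hys
      have henum : PySem.List.enumerate (ys ++ [a]) 0 =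
          PySem.List.enumerate ys 0 ++ [((ys.length : Int), a)] := by
        rw [PySem.List.enumerate_append]
        norm_num [PySem.List.enumerate_cons, PySem.List.enumerate_nil]
      have hstep : (PySem.List.enumerate (ys ++ [a]) 0).foldl pvFindStep (none, -1) =
          pvFindStep (some m, (j : Int)) ((ys.length : Int), a) := by
        rw [henum, List.foldl_append, hfold, List.foldl_cons, List.foldl_nil]
      rcases lt_trichotomy a m with hcmp | hcmp | hcmp
      · refine ⟨a, ys.length, ?_, by simp, hgetL, ?_, ?_⟩
        · rw [hstep]; simp [pvFindStep, hcmp]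
        · intro t ht
          simp only [List.length_append, List.length_singleton] at ht
          rcases Nat.lt_or_ge t ys.length with h | h
          · rw [hget t h]; exact le_of_lt (lt_of_lt_of_le hcmp (hle t h))
          · have : t = ys.length := by omega
            subst this; rw [hgetL]
        · intro t ht1 ht2
          simp only [List.length_append, List.length_singleton] at ht2
          omega
      · refine ⟨m, ys.length, ?_, by simp, by rw [hgetL, hcmp], ?_, ?_⟩
        · rw [hstep]; simp [pvFindStep, hcmp]
        · intro t ht
          simp only [List.length_append, List.length_singleton] at ht
          rcases Nat.lt_or_ge t ys.length with h | h
          · rw [hget t h]; exact hle t h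
          · have : t = ys.length := by omega
            subst this; rw [hgetL, hcmp]
        · intro t ht1 ht2
          simp only [List.length_append, List.length_singleton] at ht2
          omega
      · refine ⟨m, j, ?_, by simp; omega, by rw [hget j hjlt]; exact hgj, ?_, ?_⟩
        · rw [hstep]
          simp only [pvFindStep]
          rw [if_neg (by omega), if_neg (by omega)]
        · intro t ht
          simp only [List.length_append, List.length_singleton] at ht
          rcases Nat.lt_or_ge t ys.length with h | h
          · rw [hget t h]; exact hle t h
          · have : t = ys.length := by omega
            subst this; rw [hgetL]; exact le_of_lt hcmp
        · intro t ht1 ht2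
          simp only [List.length_append, List.length_singleton] at ht2
          rcases Nat.lt_or_ge t ys.length with h | h
          · rw [hget t h]; exact hlt t ht1 h
          · have : t = ys.length := by omega
            subst this; rw [hgetL]; exact hcmp

lemma pv_loop_eq (T : List Int) (k : Int) (hk : 1 ≤ k)
    (table : List (List (Int × Int))) (htab : GoodTable T table) :
    ∀ (fuel : Nat) (i suma : Int), 0 ≤ i →
      pvKsumaLoop T k fuel i suma = pvAltLoop k (T.length : Int) table fuel i suma := by
  intro fuel
  induction fuel with
  | zero => intro i suma hi; rfl
  | succ f ihf =>
    intro i suma hi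
    rw [pvKsumaLoop, pvAltLoop]
    by_cases hcond : i < (T.length : Int) - k
    · rw [if_pos hcond, if_pos hcond]
      -- the window
      set w := PySem.List.slice T (some i) (some (i + k)) with hw
      have hwe : w = (T.drop i.toNat).take k.toNat := by
        rw [hw, PySem.List.slice_toNat T hi (by omega)]
        congr 1
        omega
      have hwlen : w.length = k.toNat := by
        rw [hwe]
        simp only [List.length_take, List.length_drop]
        omega
      have hwget : ∀ t, t < k.toNat → w.getD t 0 = T.getD (i.toNat + t) 0 := by
        intro t ht
        rw [hwe, List.getD_eq_getElem?_getD, List.getElem?_take_of_lt ht,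
          List.getElem?_drop, ← List.getD_eq_getElem?_getD]
      have hwne : w ≠ [] := by
        intro h; rw [h] at hwlen; simp at hwlen; omega
      obtain ⟨m, j, hfold, hjlt, hgj, hle, hlt⟩ := pv_scan_isLast w hwne
      rw [hwlen] at hjlt
      -- A's step
      obtain ⟨c, cs, hcc⟩ := List.exists_cons_of_ne_nil hwne
      have hfml : pvFindMinLast w = (some m, some (j : Int)) := by
        rw [hcc, pvFindMinLast_cons, ← hcc, hfold]
      rw [hfml]
      -- B's step: query = (m, i + j)
      have hA : IsLast T i.toNat (i.toNat + k.toNat) (m, ((i.toNat + j : Nat) : Int)) := by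
        refine ⟨i.toNat + j, ?_, by omega, by omega, ?_, ?_⟩
        · have := hgj
          rw [hwget j hjlt] at this
          rw [← this]
        · intro t ht1 ht2
          have := hle (t - i.toNat) (by omega)
          rw [hwget (t - i.toNat) (by omega)] at this
          simpa [show i.toNat + (t - i.toNat) = t by omega] using this
        · intro t ht1 ht2
          have := hlt (t - i.toNat) (by omega) (by omega)
          rw [hwget (t - i.toNat) (by omega)] at this
          simpa [show i.toNat + (t - i.toNat) = t by omega] using this
      have hB := pvQuery_isLast T table htab i (i + k) hi (by omega) (by omega)
      have hik : (i + k).toNat = i.toNat + k.toNat := by omega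
      rw [hik] at hB
      have heq := isLast_unique T i.toNat (i.toNat + k.toNat) _ _ hB hA
      rw [heq]
      show pvKsumaLoop T k f (i + (j : Int) + 1) (suma + m) =
        pvAltLoop k (T.length : Int) table f (((i.toNat + j : Nat) : Int) + 1) (suma + m)
      have harg : i + (j : Int) + 1 = ((i.toNat + j : Nat) : Int) + 1 := by omega
      rw [harg]
      exact ihf _ _ (by omega)
    · rw [if_neg hcond, if_neg hcond]

-- ===== VERDICT (by name: the statement is the Claim_ definition above) =====
theorem ksuma_spec : Claim_equal_ksuma := by
  intro T k _ hpre
  unfold Spec_ksuma ksuma ksuma_alt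
  by_cases hnk : (T.length : Int) ≤ k
  · rw [if_pos hnk, pvKsumaLoop]
    rw [if_neg (by omega)]
  · rw [if_neg hnk]
    rcases hpre with hk | ⟨hT, hk0⟩
    · have hn1 : 1 ≤ T.length := by omega
      have htab : GoodTable T (pvBuild T.length T.length 2 [pvLevel0 T]) := by
        have := pvBuild_good T T.length 1 [pvLevel0 T] (le_refl 1) (by simp)
          (by intro lvl hlvl
              have : lvl = 0 := by omega
              subst this
              simpa using pvLevel0_good T)
          (by simp)
        simpa using this
      exact pv_loop_eq T k hk _ htab (T.length + 1) 0 0 (le_refl 0)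
    · subst hT
      exact absurd hk0 (by simpa using hnk)
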